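-- pv_equiv track=rewrite | github.com/cyph3rasi/kyber | kyber/agent/narrator.py | _summarize_intent
-- ===== SOURCE A (Python) =====
-- def _summarize_intent(actions: list[str]) -> str:
--     if not actions:
--         return "I'm actively working through the task."
--     lower = [a.lower() for a in actions]
--     run_count = sum(1 for a in lower if a.startswith("running"))
--     read_count = sum(1 for a in lower if a.startswith(("reading", "checking", "globbing", "grepping", "searching")))
--     edit_count = sum(1 for a in lower if a.startswith(("writing", "editing")))
--     web_count = sum(1 for a in lower if a.startswith("opening"))
--
--     if edit_count > 0:
--         return "I'm applying code/content changes and validating that the updates are correct."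
--     if run_count > 0 and read_count > 0:
--         return "I'm inspecting files and running checks to verify how this flow behaves and where to change it."
--     if run_count > 0:
--         return "I'm running targeted commands to validate the current behavior and gather evidence."
--     if read_count > 0:
--         return "I'm inspecting the relevant files and wiring to confirm exactly how this works."
--     if web_count > 0:
--         return "I'm pulling reference material needed to complete this task correctly."
--     return "I'm actively working through the task."
-- ===== SOURCE B (Python) =====
-- _PREFIX_CATEGORY = [
--     ("writing", "edit"), ("editing", "edit"),
--     ("running", "run"),
--     ("reading", "read"), ("checking", "read"), ("globbing", "read"),
--     ("grepping", "read"), ("searching", "read"),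
--     ("opening", "web"),
-- ]
--
--
-- def _summarize_intent(actions: list[str]) -> str:
--     if not actions:
--         return "I'm actively working through the task."
--     cats = set()
--     for action in actions:
--         low = action.lower()
--         for prefix, cat in _PREFIX_CATEGORY:
--             if low.startswith(prefix):
--                 cats.add(cat)
--     if "edit" in cats:
--         return "I'm applying code/content changes and validating that the updates are correct."
--     if "run" in cats and "read" in cats:
--         return "I'm inspecting files and running checks to verify how this flow behaves and where to change it."
--     if "run" in cats:
--         return "I'm running targeted commands to validate the current behavior and gather evidence."
--     if "read" in cats:
--         return "I'm inspecting the relevant files and wiring to confirm exactly how this works."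
--     if "web" in cats:
--         return "I'm pulling reference material needed to complete this task correctly."
--     return "I'm actively working through the task."
-- ===== Notes on version B (the rewrite author's own statement) =====
-- stated objective: alternative
-- what changed: Replaced the four per-category counting passes over the lowercased list by a single pass that classifies each action against a prefix-to-category table and collects the set of present categories, then dispatches on set membership.
import Mathlib
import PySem

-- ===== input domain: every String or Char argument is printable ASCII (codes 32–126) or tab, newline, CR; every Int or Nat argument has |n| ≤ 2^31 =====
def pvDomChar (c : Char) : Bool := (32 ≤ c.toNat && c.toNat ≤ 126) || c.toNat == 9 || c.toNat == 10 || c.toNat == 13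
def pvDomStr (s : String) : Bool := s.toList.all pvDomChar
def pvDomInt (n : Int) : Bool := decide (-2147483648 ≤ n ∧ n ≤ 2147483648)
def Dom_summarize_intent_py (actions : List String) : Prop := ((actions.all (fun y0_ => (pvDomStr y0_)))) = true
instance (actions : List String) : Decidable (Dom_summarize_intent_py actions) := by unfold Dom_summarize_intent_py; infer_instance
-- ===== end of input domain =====

-- B replaces A's four counting passes by one pass collecting a set of present categories via a prefix→category table (alternative decomposition, same cost).

-- ===== PORT A =====
def summarize_intent_py (actions : List String) : String :=
  if actions = [] then "I'm actively working through the task."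
  else
    let lower := actions.map PySem.Str.lower
    let run_count : Int :=
      ((lower.filter (fun a => PySem.Str.startswith a "running")).map (fun _ => (1 : Int))).sum
    let read_count : Int :=
      ((lower.filter (fun a => PySem.Str.startswith a "reading" || PySem.Str.startswith a "checking" ||
          PySem.Str.startswith a "globbing" || PySem.Str.startswith a "grepping" ||
          PySem.Str.startswith a "searching")).map (fun _ => (1 : Int))).sum
    let edit_count : Int :=
      ((lower.filter (fun a => PySem.Str.startswith a "writing" || PySem.Str.startswith a "editing")).map
          (fun _ => (1 : Int))).sum
    let web_count : Int :=
      ((lower.filter (fun a => PySem.Str.startswith a "opening")).map (fun _ => (1 : Int))).sum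
    if edit_count > 0 then
      "I'm applying code/content changes and validating that the updates are correct."
    else if run_count > 0 ∧ read_count > 0 then
      "I'm inspecting files and running checks to verify how this flow behaves and where to change it."
    else if run_count > 0 then
      "I'm running targeted commands to validate the current behavior and gather evidence."
    else if read_count > 0 then
      "I'm inspecting the relevant files and wiring to confirm exactly how this works."
    else if web_count > 0 then
      "I'm pulling reference material needed to complete this task correctly."
    else
      "I'm actively working through the task."

-- ===== PORT B =====
def pvPrefixCategory : List (String × String) :=
  [("writing", "edit"), ("editing", "edit"),
   ("running", "run"),
   ("reading", "read"), ("checking", "read"), ("globbing", "read"),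
   ("grepping", "read"), ("searching", "read"),
   ("opening", "web")]

def summarize_intent_py_alt (actions : List String) : String :=
  if actions = [] then "I'm actively working through the task."
  else
    let cats : PySem.Set String :=
      actions.foldl (fun cats action =>
        let low := PySem.Str.lower action
        pvPrefixCategory.foldl (fun cats pc =>
          if PySem.Str.startswith low pc.1 then PySem.Set.add cats pc.2 else cats) cats)
        PySem.Set.empty
    if PySem.Set.contains cats "edit" then
      "I'm applying code/content changes and validating that the updates are correct."
    else if PySem.Set.contains cats "run" && PySem.Set.contains cats "read" then
      "I'm inspecting files and running checks to verify how this flow behaves and where to change it."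
    else if PySem.Set.contains cats "run" then
      "I'm running targeted commands to validate the current behavior and gather evidence."
    else if PySem.Set.contains cats "read" then
      "I'm inspecting the relevant files and wiring to confirm exactly how this works."
    else if PySem.Set.contains cats "web" then
      "I'm pulling reference material needed to complete this task correctly."
    else
      "I'm actively working through the task."

-- ===== PRECONDITION & SPEC =====
def Spec_summarize_intent_py (actions : List String) (out : String) : Prop := out = summarize_intent_py_alt actions
instance (actions : List String) (out : String) : Decidable (Spec_summarize_intent_py actions out) := by unfold Spec_summarize_intent_py; infer_instance

-- ===== CLAIM (what is proved, stated in full; the proofs are below) =====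
def Claim_equal_summarize_intent_py : Prop := ∀ (actions : List String), Dom_summarize_intent_py actions → Spec_summarize_intent_py actions (summarize_intent_py actions)

-- ===== LEMMAS AND PROOFS =====

theorem pv_matches_mem_inner (pairs : List (String × String)) (cats : List String) (low x : String) :
    x ∈ pairs.foldl (fun cats pc =>
        if PySem.Str.startswith low pc.1 then PySem.Set.add cats pc.2 else cats) cats ↔
      x ∈ cats ∨ ∃ pc ∈ pairs, PySem.Str.startswith low pc.1 = true ∧ pc.2 = x := by
  induction pairs generalizing cats with
  | nil => simp
  | cons p ps ih =>
    simp only [List.foldl_cons]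
    by_cases h : PySem.Str.startswith low p.1 = true
    · rw [if_pos h, ih]
      simp only [PySem.Set.mem_add, List.exists_mem_cons_iff, h, true_and]
      tauto
    · rw [if_neg h, ih]
      simp only [List.exists_mem_cons_iff, h, Bool.false_eq_true, false_and, false_or]

theorem pv_matches_mem_outer (actions : List String) (cats : List String) (x : String) :
    x ∈ actions.foldl (fun cats action =>
        pvPrefixCategory.foldl (fun cats pc =>
          if PySem.Str.startswith (PySem.Str.lower action) pc.1 then PySem.Set.add cats pc.2
          else cats) cats) cats ↔
      x ∈ cats ∨ ∃ a ∈ actions,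
        ∃ pc ∈ pvPrefixCategory, PySem.Str.startswith (PySem.Str.lower a) pc.1 = true ∧ pc.2 = x := by
  induction actions generalizing cats with
  | nil => simp
  | cons a as ih =>
    simp only [List.foldl_cons]
    rw [ih, pv_matches_mem_inner, List.exists_mem_cons_iff]
    exact or_assoc

theorem pv_count_pos (actions : List String) (p : String → Bool) :
    (0 < (((actions.map PySem.Str.lower).filter p).map (fun _ => (1:Int))).sum) ↔
      ∃ a ∈ actions, p (PySem.Str.lower a) = true := by
  simp only [List.map_const', List.sum_replicate, Int.nsmul_eq_mul, mul_one,
    ← List.countP_eq_length_filter]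
  rw [Int.natCast_pos, List.countP_map, List.countP_pos_iff]
  simp [Function.comp]

theorem pv_cat_edit (a : String) :
    (∃ pc ∈ pvPrefixCategory, PySem.Str.startswith (PySem.Str.lower a) pc.1 = true ∧ pc.2 = "edit") ↔
      (PySem.Str.startswith (PySem.Str.lower a) "writing" = true ∨
       PySem.Str.startswith (PySem.Str.lower a) "editing" = true) := by
  simp [pvPrefixCategory]

theorem pv_cat_run (a : String) :
    (∃ pc ∈ pvPrefixCategory, PySem.Str.startswith (PySem.Str.lower a) pc.1 = true ∧ pc.2 = "run") ↔
      PySem.Str.startswith (PySem.Str.lower a) "running" = true := by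
  simp [pvPrefixCategory]

theorem pv_cat_read (a : String) :
    (∃ pc ∈ pvPrefixCategory, PySem.Str.startswith (PySem.Str.lower a) pc.1 = true ∧ pc.2 = "read") ↔
      ((((PySem.Str.startswith (PySem.Str.lower a) "reading" = true ∨
       PySem.Str.startswith (PySem.Str.lower a) "checking" = true) ∨
       PySem.Str.startswith (PySem.Str.lower a) "globbing" = true) ∨
       PySem.Str.startswith (PySem.Str.lower a) "grepping" = true) ∨
       PySem.Str.startswith (PySem.Str.lower a) "searching" = true) := by
  simp [pvPrefixCategory]
  tauto

theorem pv_cat_web (a : String) :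
    (∃ pc ∈ pvPrefixCategory, PySem.Str.startswith (PySem.Str.lower a) pc.1 = true ∧ pc.2 = "web") ↔
      PySem.Str.startswith (PySem.Str.lower a) "opening" = true := by
  simp [pvPrefixCategory]

theorem pv_contains_cat (actions : List String) (c : String) :
    PySem.Set.contains
      (actions.foldl (fun cats action =>
        pvPrefixCategory.foldl (fun cats pc =>
          if PySem.Str.startswith (PySem.Str.lower action) pc.1 then PySem.Set.add cats pc.2
          else cats) cats) PySem.Set.empty) c = true ↔
      ∃ a ∈ actions,
        ∃ pc ∈ pvPrefixCategory, PySem.Str.startswith (PySem.Str.lower a) pc.1 = true ∧ pc.2 = c := by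
  rw [PySem.Set.contains_iff, pv_matches_mem_outer]
  simp [PySem.Set.empty]

-- ===== VERDICT (by name: the statement is the Claim_ definition above) =====
theorem summarize_intent_py_spec : Claim_equal_summarize_intent_py := by
  unfold Claim_equal_summarize_intent_py
  intro actions _
  unfold Spec_summarize_intent_py summarize_intent_py summarize_intent_py_alt
  by_cases hnil : actions = []
  · simp [hnil]
  · simp only [if_neg hnil, gt_iff_lt, Bool.and_eq_true,
      pv_count_pos, pv_contains_cat, pv_cat_edit, pv_cat_run, pv_cat_read, pv_cat_web,
      Bool.or_eq_true]
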